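-- pv_equiv track=rewrite | github.com/shirodw/homework_for_students | 3_functions/1_phone_text_code/decode/decode.py | decode_numbers
-- ===== SOURCE A (Python) =====
-- def decode_numbers(numbers: str) -> str | None:
--     keypad = {
--         '1': ".,?!:;",
--         '2': "абвг",
--         '3': "дежз",
--         '4': "ийкл",
--         '5': "мноп",
--         '6': "рсту",
--         '7': "фхчц",
--         '8': "шщъы",
--         '9': "ьэюя",
--         '0': " "
--     }
--     result = []
--     groups = numbers.split()
--     for group in groups:
--         if not group:
--             continue
--         if len(set(group)) != 1:
--             return None
--         button = group[0]
--         press_count = len(group)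
--         if button not in keypad or press_count > len(keypad[button]):
--             return None
--         result.append(keypad[button][press_count - 1])
--     return ''.join(result)
-- ===== SOURCE B (Python) =====
-- def decode_numbers(numbers: str) -> str | None:
--     table = {
--         '1': '.', '11': ',', '111': '?', '1111': '!', '11111': ':', '111111': ';',
--         '2': 'а', '22': 'б', '222': 'в', '2222': 'г',
--         '3': 'д', '33': 'е', '333': 'ж', '3333': 'з',
--         '4': 'и', '44': 'й', '444': 'к', '4444': 'л',
--         '5': 'м', '55': 'н', '555': 'о', '5555': 'п',
--         '6': 'р', '66': 'с', '666': 'т', '6666': 'у',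
--         '7': 'ф', '77': 'х', '777': 'ч', '7777': 'ц',
--         '8': 'ш', '88': 'щ', '888': 'ъ', '8888': 'ы',
--         '9': 'ь', '99': 'э', '999': 'ю', '9999': 'я',
--         '0': ' ',
--     }
--     chars = [table.get(g) for g in numbers.split()]
--     if None in chars:
--         return None
--     return ''.join(chars)
-- ===== Notes on version B (the rewrite author's own statement) =====
-- stated objective: idiomatic
-- what changed: B replaces A's per-group set()/membership/length/index logic by a single hand-written lookup table keyed by the whole digit-run ('2','22',...), mapping each group with one dict lookup and checking for None afterwards instead of early-returning inside the loop.
import Mathlib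
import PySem

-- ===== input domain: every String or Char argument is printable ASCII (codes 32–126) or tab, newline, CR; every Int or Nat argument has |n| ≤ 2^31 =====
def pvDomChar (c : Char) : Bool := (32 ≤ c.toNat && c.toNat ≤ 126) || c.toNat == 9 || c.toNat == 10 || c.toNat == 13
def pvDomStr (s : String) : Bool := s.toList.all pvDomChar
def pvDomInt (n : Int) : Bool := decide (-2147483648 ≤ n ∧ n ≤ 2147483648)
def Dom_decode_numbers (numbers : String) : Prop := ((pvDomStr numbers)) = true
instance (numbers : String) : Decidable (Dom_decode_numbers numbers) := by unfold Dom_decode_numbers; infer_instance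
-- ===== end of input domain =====

-- B replaces A's per-group set()/membership/length/index logic by one hand-written lookup
-- table keyed by the whole digit-run, mapping every group and checking for None afterwards;
-- objective: more idiomatic, same cost.

-- ===== PORT A =====
-- the keypad dict of A (1-char string keys as Char, string values as List Char)
def pvKeypadA : PySem.Dict Char (List Char) := PySem.Dict.mk
  [('1', ".,?!:;".toList), ('2', "абвг".toList), ('3', "дежз".toList),
   ('4', "ийкл".toList), ('5', "мноп".toList), ('6', "рсту".toList),
   ('7', "фхчц".toList), ('8', "шщъы".toList), ('9', "ьэюя".toList),
   ('0', " ".toList)]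

-- the for-loop of A over the split groups (result list built as cons on the tail's result = append order)
def pvDecodeAGo : List (List Char) → Option (List Char)
  | [] => some []
  | g :: gs =>
    if g = [] then pvDecodeAGo gs  -- 'continue' (unreachable: split() has no empty groups)
    else if (PySem.Set.ofList g).length ≠ 1 then none
    else match PySem.List.pyGet? g 0 with
      | none => none  -- IndexError, unreachable (g ≠ [])
      | some button =>
        let pressCount : Int := g.length
        match PySem.Dict.get? pvKeypadA button with
        | none => none  -- 'button not in keypad'
        | some s =>
          if pressCount > (s.length : Int) then none
          else match PySem.List.pyGet? s (pressCount - 1) with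
            | none => none  -- unreachable
            | some ch => (pvDecodeAGo gs).map (ch :: ·)

def decode_numbers (numbers : String) : Option String :=
  (pvDecodeAGo (PySem.Chars.split₀ numbers.toList)).map String.ofList

-- ===== PORT B =====
-- the literal table of Source B: whole digit-run → decoded character
def pvTable : PySem.Dict (List Char) Char := PySem.Dict.mk
  [("1".toList, '.'), ("11".toList, ','), ("111".toList, '?'),
   ("1111".toList, '!'), ("11111".toList, ':'), ("111111".toList, ';'),
   ("2".toList, 'а'), ("22".toList, 'б'), ("222".toList, 'в'), ("2222".toList, 'г'),
   ("3".toList, 'д'), ("33".toList, 'е'), ("333".toList, 'ж'), ("3333".toList, 'з'),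
   ("4".toList, 'и'), ("44".toList, 'й'), ("444".toList, 'к'), ("4444".toList, 'л'),
   ("5".toList, 'м'), ("55".toList, 'н'), ("555".toList, 'о'), ("5555".toList, 'п'),
   ("6".toList, 'р'), ("66".toList, 'с'), ("666".toList, 'т'), ("6666".toList, 'у'),
   ("7".toList, 'ф'), ("77".toList, 'х'), ("777".toList, 'ч'), ("7777".toList, 'ц'),
   ("8".toList, 'ш'), ("88".toList, 'щ'), ("888".toList, 'ъ'), ("8888".toList, 'ы'),
   ("9".toList, 'ь'), ("99".toList, 'э'), ("999".toList, 'ю'), ("9999".toList, 'я'),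
   ("0".toList, ' ')]

-- chars = [table.get(g) for g in numbers.split()]; if None in chars: None; ''.join(chars)
def decode_numbers_alt (numbers : String) : Option String :=
  let chars := (PySem.Chars.split₀ numbers.toList).map (PySem.Dict.get? pvTable)
  if none ∈ chars then none
  else some (String.ofList (chars.filterMap id))

-- ===== PRECONDITION & SPEC =====
def Spec_decode_numbers (numbers : String) (out : Option String) : Prop := out = decode_numbers_alt numbers
instance (numbers : String) (out : Option String) : Decidable (Spec_decode_numbers numbers out) := by unfold Spec_decode_numbers; infer_instance

-- ===== CLAIM (what is proved, stated in full; the proofs are below) =====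
def Claim_equal_decode_numbers : Prop := ∀ (numbers : String), Dom_decode_numbers numbers → Spec_decode_numbers numbers (decode_numbers numbers)

-- ===== LEMMAS AND PROOFS =====

-- A's per-group computation, factored out for the proof
def pvStep (g : List Char) : Option Char :=
  if (PySem.Set.ofList g).length ≠ 1 then none
  else match PySem.List.pyGet? g 0 with
    | none => none
    | some button =>
      let pressCount : Int := g.length
      match PySem.Dict.get? pvKeypadA button with
      | none => none
      | some s =>
        if pressCount > (s.length : Int) then none
        else PySem.List.pyGet? s (pressCount - 1)

lemma pvStepA (g : List Char) (gs : List (List Char)) (hg : g ≠ []) :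
    pvDecodeAGo (g :: gs) = match pvStep g with
      | none => none
      | some ch => (pvDecodeAGo gs).map (ch :: ·) := by
  rw [pvDecodeAGo, pvStep]
  simp only [if_neg hg]
  split
  · rfl
  · cases PySem.List.pyGet? g 0 with
    | none => rfl
    | some button =>
      dsimp only
      cases PySem.Dict.get? pvKeypadA button with
      | none => rfl
      | some s =>
        dsimp only
        split
        · rfl
        · cases PySem.List.pyGet? s ((g.length : Int) - 1) <;> rfl

-- (n, buttonChar, decodedChar) triples underlying B's table, in its order
def pvPairs : List (Nat × Char × Char) :=
  [(1, '1', '.'), (2, '1', ','), (3, '1', '?'), (4, '1', '!'), (5, '1', ':'), (6, '1', ';'),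
   (1, '2', 'а'), (2, '2', 'б'), (3, '2', 'в'), (4, '2', 'г'),
   (1, '3', 'д'), (2, '3', 'е'), (3, '3', 'ж'), (4, '3', 'з'),
   (1, '4', 'и'), (2, '4', 'й'), (3, '4', 'к'), (4, '4', 'л'),
   (1, '5', 'м'), (2, '5', 'н'), (3, '5', 'о'), (4, '5', 'п'),
   (1, '6', 'р'), (2, '6', 'с'), (3, '6', 'т'), (4, '6', 'у'),
   (1, '7', 'ф'), (2, '7', 'х'), (3, '7', 'ч'), (4, '7', 'ц'),
   (1, '8', 'ш'), (2, '8', 'щ'), (3, '8', 'ъ'), (4, '8', 'ы'),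
   (1, '9', 'ь'), (2, '9', 'э'), (3, '9', 'ю'), (4, '9', 'я'),
   (1, '0', ' ')]

set_option maxRecDepth 8192 in
lemma pvTable_eq : pvTable = PySem.Dict.mk
    (pvPairs.map fun p => (List.replicate p.1 p.2.1, p.2.2)) := by decide

lemma pvRepl_eq_repl_iff {n m : Nat} {b c : Char} (hn : 0 < n) :
    List.replicate n b = List.replicate m c ↔ n = m ∧ b = c := by
  constructor
  · intro h
    have hlen : n = m := by simpa using congrArg List.length h
    subst hlen
    refine ⟨rfl, ?_⟩
    cases n with
    | zero => omega
    | succ k => simpa [List.replicate] using congrArg List.head? h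
  · rintro ⟨rfl, rfl⟩; rfl

-- lookup of a nonempty constant run in B's table = lookup of the (length, char) pair
lemma pvLookup_repl (L : List (Nat × Char × Char)) (n : Nat) (b : Char) (hn : 0 < n) :
    PySem.Dict.get? (PySem.Dict.mk (L.map fun p => (List.replicate p.1 p.2.1, p.2.2)))
        (List.replicate n b)
      = PySem.Dict.get? (PySem.Dict.mk (L.map fun p => ((p.1, p.2.1), p.2.2))) (n, b) := by
  induction L with
  | nil => rfl
  | cons p L ih =>
    simp only [List.map_cons, PySem.Dict.get?_mk_cons, ih]
    congr 1
    by_cases h : p.1 = n ∧ p.2.1 = b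
    · simp [h.1, h.2]
    · have h1 : (List.replicate p.1 p.2.1 == List.replicate n b) = false := by
        rw [beq_eq_false_iff_ne]
        intro hc
        rcases Nat.eq_zero_or_pos p.1 with h0 | hp
        · have := congrArg List.length hc
          simp [h0] at this
          omega
        · exact h ((pvRepl_eq_repl_iff hp).mp hc)
      have h2 : (((p.1, p.2.1) : Nat × Char) == (n, b)) = false := by
        rw [beq_eq_false_iff_ne]
        intro hc
        exact h ⟨congrArg Prod.fst hc, congrArg Prod.snd hc⟩
      rw [h1, h2]

-- lookup of a non-constant group in B's table is none
lemma pvLookup_not_repl (L : List (Nat × Char × Char)) (g : List Char)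
    (hg : ∀ (m : Nat) (c : Char), g ≠ List.replicate m c) :
    PySem.Dict.get? (PySem.Dict.mk (L.map fun p => (List.replicate p.1 p.2.1, p.2.2))) g
      = none := by
  induction L with
  | nil => rfl
  | cons p L ih =>
    simp only [List.map_cons, PySem.Dict.get?_mk_cons, ih]
    have h1 : (List.replicate p.1 p.2.1 == g) = false := by
      rw [beq_eq_false_iff_ne]; exact fun hc => hg p.1 p.2.1 hc.symm
    simp [h1]

-- Prop-level view of the (length, char) lookup, for symbolic lengths
def pvF : List (Nat × Char × Char) → Nat → Char → Option Char
  | [], _, _ => none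
  | p :: L, n, b => if p.1 = n ∧ p.2.1 = b then some p.2.2 else pvF L n b

lemma pvGet_pairs_eq_f (L : List (Nat × Char × Char)) (n : Nat) (b : Char) :
    PySem.Dict.get? (PySem.Dict.mk (L.map fun p => ((p.1, p.2.1), p.2.2))) (n, b)
      = pvF L n b := by
  induction L with
  | nil => rfl
  | cons p L ih =>
    simp only [List.map_cons, PySem.Dict.get?_mk_cons, pvF, ih]
    congr 1
    by_cases h : p.1 = n ∧ p.2.1 = b
    · simp [h.1, h.2]
    · have h1 : (((p.1, p.2.1) : Nat × Char) == (n, b)) = false := by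
        rw [beq_eq_false_iff_ne]
        intro hc
        exact h ⟨congrArg Prod.fst hc, congrArg Prod.snd hc⟩
      simp [h1, h]

-- set() of a nonempty constant run is the singleton
lemma pvFoldl_add_const (l : List Char) (b : Char) (hl : ∀ x ∈ l, x = b) :
    l.foldl PySem.Set.add [b] = [b] := by
  induction l with
  | nil => rfl
  | cons x l ih =>
    have hx : x = b := hl x (List.mem_cons_self ..)
    subst hx
    have hadd : PySem.Set.add [x] x = [x] := by
      simp [PySem.Set.add, PySem.Set.contains]
    rw [List.foldl_cons, hadd]
    exact ih fun y hy => hl y (List.mem_cons_of_mem _ hy)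

lemma pvOfList_replicate (n : Nat) (b : Char) (hn : 0 < n) :
    PySem.Set.ofList (List.replicate n b) = [b] := by
  cases n with
  | zero => omega
  | succ k =>
    rw [List.replicate_succ, PySem.Set.ofList_eq_foldl, List.foldl_cons]
    have hadd : PySem.Set.add ([] : PySem.Set Char) b = [b] := by
      simp [PySem.Set.add, PySem.Set.contains]
    rw [hadd]
    exact pvFoldl_add_const _ _ fun x hx => List.eq_of_mem_replicate hx

-- a group whose set() has one element is a constant run
lemma pvConst_of_len_one (g : List Char) (h : (PySem.Set.ofList g).length = 1) :
    ∃ b, ∀ x ∈ g, x = b := by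
  obtain ⟨b, hb⟩ : ∃ b, PySem.Set.ofList g = [b] := by
    cases hs : PySem.Set.ofList g with
    | nil => rw [hs] at h; simp at h
    | cons b t =>
      rw [hs] at h
      simp at h
      exact ⟨b, by rw [h]⟩
  refine ⟨b, fun x hx => ?_⟩
  have hmem : x ∈ PySem.Set.ofList g := by rw [PySem.Set.mem_ofList]; exact hx
  rw [hb] at hmem
  simpa using hmem

-- the heart: A's per-group logic = B's table lookup, for nonempty groups
set_option maxRecDepth 8192 in
lemma pvStep_eq (g : List Char) (hg : g ≠ []) :
    pvStep g = PySem.Dict.get? pvTable g := by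
  rw [pvTable_eq]
  by_cases hrep : ∃ b, ∀ x ∈ g, x = b
  · obtain ⟨b, hb⟩ := hrep
    have hgr : g = List.replicate g.length b := List.eq_replicate_iff.mpr ⟨rfl, hb⟩
    obtain ⟨n, hn0, rfl⟩ : ∃ n, 0 < n ∧ g = List.replicate n b :=
      ⟨g.length, List.length_pos_of_ne_nil hg, hgr⟩
    rw [pvLookup_repl pvPairs n b hn0, pvGet_pairs_eq_f, pvStep]
    rw [if_neg (by rw [pvOfList_replicate _ _ hn0]; simp)]
    have hget : PySem.List.pyGet? (List.replicate n b) 0 = some b := by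
      cases n with
      | zero => omega
      | succ k => rw [List.replicate_succ]; exact PySem.List.pyGet?_zero_cons ..
    rw [hget]
    simp only [List.length_replicate]
    by_cases hb1 : '1' = b
    · subst hb1
      by_cases e1 : (1 : Nat) = n; · subst e1; decide
      by_cases e2 : (2 : Nat) = n; · subst e2; decide
      by_cases e3 : (3 : Nat) = n; · subst e3; decide
      by_cases e4 : (4 : Nat) = n; · subst e4; decide
      by_cases e5 : (5 : Nat) = n; · subst e5; decide
      by_cases e6 : (6 : Nat) = n; · subst e6; decide
      have hgt : (6 : Int) < (n : Int) := by exact_mod_cast (show (6 : Nat) < n by omega)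
      simp [pvF, pvPairs, pvKeypadA, PySem.Dict.get?_mk_cons, e1, e2, e3, e4, e5, e6, hgt]
    by_cases hb2 : '2' = b
    · subst hb2
      by_cases e1 : (1 : Nat) = n; · subst e1; decide
      by_cases e2 : (2 : Nat) = n; · subst e2; decide
      by_cases e3 : (3 : Nat) = n; · subst e3; decide
      by_cases e4 : (4 : Nat) = n; · subst e4; decide
      have hgt : (4 : Int) < (n : Int) := by exact_mod_cast (show (4 : Nat) < n by omega)
      simp [pvF, pvPairs, pvKeypadA, PySem.Dict.get?_mk_cons, e1, e2, e3, e4, hgt]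
    by_cases hb3 : '3' = b
    · subst hb3
      by_cases e1 : (1 : Nat) = n; · subst e1; decide
      by_cases e2 : (2 : Nat) = n; · subst e2; decide
      by_cases e3 : (3 : Nat) = n; · subst e3; decide
      by_cases e4 : (4 : Nat) = n; · subst e4; decide
      have hgt : (4 : Int) < (n : Int) := by exact_mod_cast (show (4 : Nat) < n by omega)
      simp [pvF, pvPairs, pvKeypadA, PySem.Dict.get?_mk_cons, e1, e2, e3, e4, hgt]
    by_cases hb4 : '4' = b
    · subst hb4
      by_cases e1 : (1 : Nat) = n; · subst e1; decide
      by_cases e2 : (2 : Nat) = n; · subst e2; decide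
      by_cases e3 : (3 : Nat) = n; · subst e3; decide
      by_cases e4 : (4 : Nat) = n; · subst e4; decide
      have hgt : (4 : Int) < (n : Int) := by exact_mod_cast (show (4 : Nat) < n by omega)
      simp [pvF, pvPairs, pvKeypadA, PySem.Dict.get?_mk_cons, e1, e2, e3, e4, hgt]
    by_cases hb5 : '5' = b
    · subst hb5
      by_cases e1 : (1 : Nat) = n; · subst e1; decide
      by_cases e2 : (2 : Nat) = n; · subst e2; decide
      by_cases e3 : (3 : Nat) = n; · subst e3; decide
      by_cases e4 : (4 : Nat) = n; · subst e4; decide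
      have hgt : (4 : Int) < (n : Int) := by exact_mod_cast (show (4 : Nat) < n by omega)
      simp [pvF, pvPairs, pvKeypadA, PySem.Dict.get?_mk_cons, e1, e2, e3, e4, hgt]
    by_cases hb6 : '6' = b
    · subst hb6
      by_cases e1 : (1 : Nat) = n; · subst e1; decide
      by_cases e2 : (2 : Nat) = n; · subst e2; decide
      by_cases e3 : (3 : Nat) = n; · subst e3; decide
      by_cases e4 : (4 : Nat) = n; · subst e4; decide
      have hgt : (4 : Int) < (n : Int) := by exact_mod_cast (show (4 : Nat) < n by omega)
      simp [pvF, pvPairs, pvKeypadA, PySem.Dict.get?_mk_cons, e1, e2, e3, e4, hgt]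
    by_cases hb7 : '7' = b
    · subst hb7
      by_cases e1 : (1 : Nat) = n; · subst e1; decide
      by_cases e2 : (2 : Nat) = n; · subst e2; decide
      by_cases e3 : (3 : Nat) = n; · subst e3; decide
      by_cases e4 : (4 : Nat) = n; · subst e4; decide
      have hgt : (4 : Int) < (n : Int) := by exact_mod_cast (show (4 : Nat) < n by omega)
      simp [pvF, pvPairs, pvKeypadA, PySem.Dict.get?_mk_cons, e1, e2, e3, e4, hgt]
    by_cases hb8 : '8' = b
    · subst hb8
      by_cases e1 : (1 : Nat) = n; · subst e1; decide
      by_cases e2 : (2 : Nat) = n; · subst e2; decide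
      by_cases e3 : (3 : Nat) = n; · subst e3; decide
      by_cases e4 : (4 : Nat) = n; · subst e4; decide
      have hgt : (4 : Int) < (n : Int) := by exact_mod_cast (show (4 : Nat) < n by omega)
      simp [pvF, pvPairs, pvKeypadA, PySem.Dict.get?_mk_cons, e1, e2, e3, e4, hgt]
    by_cases hb9 : '9' = b
    · subst hb9
      by_cases e1 : (1 : Nat) = n; · subst e1; decide
      by_cases e2 : (2 : Nat) = n; · subst e2; decide
      by_cases e3 : (3 : Nat) = n; · subst e3; decide
      by_cases e4 : (4 : Nat) = n; · subst e4; decide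
      have hgt : (4 : Int) < (n : Int) := by exact_mod_cast (show (4 : Nat) < n by omega)
      simp [pvF, pvPairs, pvKeypadA, PySem.Dict.get?_mk_cons, e1, e2, e3, e4, hgt]
    by_cases hb0 : '0' = b
    · subst hb0
      by_cases e1 : (1 : Nat) = n; · subst e1; decide
      have hgt : (1 : Int) < (n : Int) := by exact_mod_cast (show (1 : Nat) < n by omega)
      simp [pvF, pvPairs, pvKeypadA, PySem.Dict.get?_mk_cons, e1, hgt]
    · simp [pvF, pvPairs, pvKeypadA, PySem.Dict.get?,
        hb1, hb2, hb3, hb4, hb5, hb6, hb7, hb8, hb9, hb0]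
  · have h1 : (PySem.Set.ofList g).length ≠ 1 := fun hc => hrep (pvConst_of_len_one g hc)
    rw [pvStep, if_pos h1, pvLookup_not_repl]
    intro m c hc
    refine hrep ⟨c, fun x hx => ?_⟩
    exact List.eq_of_mem_replicate (hc ▸ hx)

-- A's loop = B's map-then-check-then-join, over nonempty groups
lemma pvGo_eq (gs : List (List Char)) (h : ∀ g ∈ gs, g ≠ []) :
    pvDecodeAGo gs =
      (if none ∈ gs.map (PySem.Dict.get? pvTable) then none
       else some ((gs.map (PySem.Dict.get? pvTable)).filterMap id)) := by
  induction gs with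
  | nil => simp [pvDecodeAGo]
  | cons g gs ih =>
    have hg : g ≠ [] := h g (List.mem_cons_self ..)
    rw [pvStepA g gs hg, pvStep_eq g hg,
        ih fun x hx => h x (List.mem_cons_of_mem _ hx)]
    cases hget : PySem.Dict.get? pvTable g with
    | none => simp [hget]
    | some ch =>
      by_cases hn : none ∈ gs.map (PySem.Dict.get? pvTable)
      · simp [hget, hn]
      · simp [hget, hn]

-- every group produced by split() is nonempty
lemma pvSplit0Go_ne_nil (s cur : List Char) (acc : List (List Char))
    (hacc : ∀ a ∈ acc, a ≠ []) :
    ∀ g ∈ PySem.Chars.split₀.go s cur acc, g ≠ [] := by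
  induction s generalizing cur acc with
  | nil =>
    intro g hgmem
    rw [PySem.Chars.split₀.go] at hgmem
    split at hgmem
    · exact hacc g (by simpa using hgmem)
    · rename_i hcur
      rw [List.mem_reverse, List.mem_cons] at hgmem
      rcases hgmem with rfl | hm
      · simpa [List.isEmpty_iff] using hcur
      · exact hacc g hm
  | cons c rest ih =>
    intro g hgmem
    rw [PySem.Chars.split₀.go] at hgmem
    split at hgmem
    · split at hgmem
      · exact ih [] acc hacc g hgmem
      · rename_i hcur
        refine ih [] _ ?_ g hgmem
        intro a ha
        rcases List.mem_cons.mp ha with rfl | hm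
        · simpa [List.isEmpty_iff] using hcur
        · exact hacc a hm
    · exact ih (c :: cur) acc hacc g hgmem

lemma pvSplit0_ne_nil (s : List Char) : ∀ g ∈ PySem.Chars.split₀ s, g ≠ [] :=
  pvSplit0Go_ne_nil s [] [] (by simp)

-- ===== VERDICT (by name: the statement is the Claim_ definition above) =====
theorem decode_numbers_spec : Claim_equal_decode_numbers := by
  intro numbers _
  unfold Spec_decode_numbers decode_numbers decode_numbers_alt
  rw [pvGo_eq _ (pvSplit0_ne_nil _)]
  by_cases hn : none ∈ (PySem.Chars.split₀ numbers.toList).map (PySem.Dict.get? pvTable)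
  · rw [if_pos hn]; exact (if_pos hn).symm
  · rw [if_neg hn]; exact (if_neg hn).symm
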